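-- pv_equiv track=rewrite | github.com/jazukaMob/SkillAssesment-AnchorzUp | main.py | generate_sequences_recursive
-- ===== SOURCE A (Python) =====
-- def generate_sequences_recursive(x_, y_, path='', sequences=None):
--     if sequences is None:
--         sequences = []
--     if x_ == 0 and y_ == 0:
--         sequences.append(path)
--     if x_ > 0:
--         generate_sequences_recursive(x_ - 1, y_, path + 'E', sequences)
--     if y_ > 0:
--         generate_sequences_recursive(x_, y_ - 1, path + 'N', sequences)
--     return sequences
-- ===== SOURCE B (Python) =====
-- def generate_sequences_recursive(x_, y_, path='', sequences=None):
--     if sequences is None: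
--         sequences = []
--     stack = [(x_, y_, path)]
--     while stack:
--         x, y, p = stack.pop()
--         if x == 0 and y == 0:
--             sequences.append(p)
--         # push the N-branch first so the E-branch is explored first (A's order)
--         if y > 0:
--             stack.append((x, y - 1, p + 'N'))
--         if x > 0:
--             stack.append((x - 1, y, p + 'E'))
--     return sequences
-- ===== Notes on version B (the rewrite author's own statement) =====
-- stated objective: alternative
-- what changed: Replaces A's recursive DFS (threading the output list and a growing prefix through nested calls) with an iterative DFS over an explicit stack of (x, y, prefix) frames, pushing the N-branch before the E-branch to keep A's output order; Pre_ excludes exactly the inputs where recursion depth x_+y_ (positive parts) reaches 9998, on which A raises RecursionError.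
import Mathlib
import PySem

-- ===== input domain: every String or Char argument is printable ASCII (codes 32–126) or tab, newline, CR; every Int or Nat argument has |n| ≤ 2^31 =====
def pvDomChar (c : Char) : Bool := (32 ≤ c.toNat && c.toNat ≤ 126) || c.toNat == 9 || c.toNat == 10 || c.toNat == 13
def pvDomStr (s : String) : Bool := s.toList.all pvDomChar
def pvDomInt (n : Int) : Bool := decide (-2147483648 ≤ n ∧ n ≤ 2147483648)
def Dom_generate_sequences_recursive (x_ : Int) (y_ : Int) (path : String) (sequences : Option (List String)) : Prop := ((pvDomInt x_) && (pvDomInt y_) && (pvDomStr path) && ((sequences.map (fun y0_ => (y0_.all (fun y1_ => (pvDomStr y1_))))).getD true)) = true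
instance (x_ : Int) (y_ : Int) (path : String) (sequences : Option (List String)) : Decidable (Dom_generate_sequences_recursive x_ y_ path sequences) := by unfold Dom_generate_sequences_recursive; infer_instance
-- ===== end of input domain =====

-- B replaces A's recursive DFS with an iterative DFS over an explicit stack of (x, y, prefix)
-- frames (N-branch pushed before E-branch to keep A's output order); objective: alternative
-- decomposition, same cost, no recursion. Equivalence is about the RETURN value only
-- (Python A and B both append to the caller's `sequences` list in place).
-- Both ports use a structural fuel parameter only to make the same computation total;
-- the fuel is provably sufficient on every input (see the lemmas below the claim block).

-- ===== PORT A =====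
-- the body of A after the `sequences is None` default is resolved: `seqs` is the list so far;
-- the fuel bounds the recursion depth (x_⁺ + y_⁺ + 1 always suffices)
def gsrGoF (fuel : Nat) (x_ : Int) (y_ : Int) (path : String) (seqs : List String) : List String :=
  match fuel with
  | 0 => seqs  -- never reached: fuel exceeds the recursion depth
  | f + 1 =>
    let s1 := if x_ = 0 ∧ y_ = 0 then seqs ++ [path] else seqs
    let s2 := if 0 < x_ then gsrGoF f (x_ - 1) y_ (path ++ "E") s1 else s1
    if 0 < y_ then gsrGoF f x_ (y_ - 1) (path ++ "N") s2 else s2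

def generate_sequences_recursive (x_ : Int) (y_ : Int) (path : String) (sequences : Option (List String)) : List String :=
  gsrGoF (x_.toNat + y_.toNat + 1) x_ y_ path (sequences.getD [])

-- ===== PORT B =====
-- weight of one stack frame; the sum of weights strictly decreases at every loop iteration,
-- so it bounds the number of iterations and serves as the loop's fuel
def frameW (t : Int × Int × String) : Nat := 3 ^ (t.1.toNat + t.2.1.toNat)

-- the two conditional pushes of one iteration, in pop order (E-branch frame on top)
def pushesB (x : Int) (y : Int) (p : String) : List (Int × Int × String) :=
  (if 0 < x then [(x - 1, y, p ++ "E")] else []) ++ (if 0 < y then [(x, y - 1, p ++ "N")] else [])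

-- the while loop: pop a frame, append on a leaf, push the N- then the E-branch
def gsrLoopF (fuel : Nat) (stack : List (Int × Int × String)) (seqs : List String) : List String :=
  match fuel, stack with
  | _, [] => seqs
  | 0, _ => seqs  -- never reached: fuel bounds the iteration count
  | f + 1, (x, y, p) :: rest =>
    let seqs' := if x = 0 ∧ y = 0 then seqs ++ [p] else seqs
    gsrLoopF f (pushesB x y p ++ rest) seqs'

def generate_sequences_recursive_alt (x_ : Int) (y_ : Int) (path : String) (sequences : Option (List String)) : List String :=
  gsrLoopF (frameW (x_, y_, path)) [(x_, y_, path)] (sequences.getD [])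

-- ===== PRECONDITION & SPEC =====
-- Pre_ excludes exactly the inputs on which Python A RAISES: with recursion depth
-- x_⁺ + y_⁺ ≥ 9998 the recursive A exhausts the interpreter's recursion limit and raises
-- RecursionError (measured: under the harness recursion limit of 10000, A raises exactly
-- from x_⁺ + y_⁺ = 9998); A returns normally on every input Pre_ admits.
def Pre_generate_sequences_recursive (x_ : Int) (y_ : Int) (_path : String) (_sequences : Option (List String)) : Prop :=
  x_.toNat + y_.toNat < 9998
instance (x_ : Int) (y_ : Int) (path : String) (sequences : Option (List String)) : Decidable (Pre_generate_sequences_recursive x_ y_ path sequences) := by unfold Pre_generate_sequences_recursive; infer_instance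

def pvWitness_generate_sequences_recursive : Int × Int × String × Option (List String) := (2, 1, "", none)

def Spec_generate_sequences_recursive (x_ : Int) (y_ : Int) (path : String) (sequences : Option (List String)) (out : List String) : Prop := out = generate_sequences_recursive_alt x_ y_ path sequences
instance (x_ : Int) (y_ : Int) (path : String) (sequences : Option (List String)) (out : List String) : Decidable (Spec_generate_sequences_recursive x_ y_ path sequences out) := by unfold Spec_generate_sequences_recursive; infer_instance

-- ===== CLAIM (what is proved, stated in full; the proofs are below) =====
def Claim_equal_generate_sequences_recursive : Prop := ∀ (x_ : Int) (y_ : Int) (path : String) (sequences : Option (List String)), Dom_generate_sequences_recursive x_ y_ path sequences → Pre_generate_sequences_recursive x_ y_ path sequences → Spec_generate_sequences_recursive x_ y_ path sequences (generate_sequences_recursive x_ y_ path sequences)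

-- ===== LEMMAS AND PROOFS =====

-- the fuel-free recursive DFS, the common reference point of the two ports
def gsrSpec (x_ : Int) (y_ : Int) (path : String) (seqs : List String) : List String :=
  let s1 := if x_ = 0 ∧ y_ = 0 then seqs ++ [path] else seqs
  let s2 := if 0 < x_ then gsrSpec (x_ - 1) y_ (path ++ "E") s1 else s1
  if 0 < y_ then gsrSpec x_ (y_ - 1) (path ++ "N") s2 else s2
termination_by (x_.toNat + y_.toNat)
decreasing_by all_goals omega

-- any fuel above the recursion depth lets port A's loop compute the fuel-free DFS
theorem gsrGoF_eq_spec (f : Nat) : ∀ (x_ y_ : Int) (path : String) (seqs : List String),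
    x_.toNat + y_.toNat < f → gsrGoF f x_ y_ path seqs = gsrSpec x_ y_ path seqs := by
  induction f with
  | zero => intro x_ y_ path seqs h; omega
  | succ f ih =>
    intro x_ y_ path seqs h
    rw [gsrGoF, gsrSpec]
    by_cases hx : 0 < x_ <;> by_cases hy : 0 < y_ <;>
      simp only [hx, hy, if_true, if_false] <;>
      try first
        | rw [ih _ _ _ _ (by omega), ih _ _ _ _ (by omega)]
        | rw [ih _ _ _ _ (by omega)]

-- the sum of frame weights strictly dominates the weights pushed by one iteration
theorem pushesB_measure_lt (x : Int) (y : Int) (p p' : String) :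
    ((pushesB x y p').map frameW).sum < frameW (x, y, p) := by
  unfold pushesB frameW
  split_ifs with hx hy hy
  · obtain ⟨t, ht⟩ : ∃ t, x.toNat + y.toNat = t + 1 := ⟨x.toNat + y.toNat - 1, by omega⟩
    have h1 : (x - 1).toNat + y.toNat = t := by omega
    have h2 : x.toNat + (y - 1).toNat = t := by omega
    simp only [List.map_cons, List.map_nil, List.sum_cons, List.sum_nil, List.map_append,
      List.sum_append, h1, h2]
    rw [ht, pow_succ]
    have := Nat.one_le_pow t 3 (by omega)
    omega
  · obtain ⟨t, ht⟩ : ∃ t, x.toNat + y.toNat = t + 1 := ⟨x.toNat + y.toNat - 1, by omega⟩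
    have h1 : (x - 1).toNat + y.toNat = t := by omega
    simp only [List.map_cons, List.map_nil, List.sum_cons, List.sum_nil, List.append_nil, h1]
    rw [ht, pow_succ]
    have := Nat.one_le_pow t 3 (by omega)
    omega
  · obtain ⟨t, ht⟩ : ∃ t, x.toNat + y.toNat = t + 1 := ⟨x.toNat + y.toNat - 1, by omega⟩
    have h2 : x.toNat + (y - 1).toNat = t := by omega
    simp only [List.map_cons, List.map_nil, List.sum_cons, List.sum_nil, List.nil_append, h2]
    rw [ht, pow_succ]
    have := Nat.one_le_pow t 3 (by omega)
    omega
  · simp only [List.append_nil, List.map_nil, List.sum_nil]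
    exact pow_pos (by omega) _

-- with fuel at least the summed frame weights, B's loop folds the fuel-free DFS over its stack
theorem gsrLoopF_eq_foldl (f : Nat) : ∀ (stack : List (Int × Int × String)),
    (stack.map frameW).sum ≤ f → ∀ (seqs : List String),
    gsrLoopF f stack seqs = stack.foldl (fun acc t => gsrSpec t.1 t.2.1 t.2.2 acc) seqs := by
  induction f with
  | zero =>
    intro stack h seqs
    match stack with
    | [] => rfl
    | (x, y, p) :: rest =>
      exfalso
      have h1 : 0 < frameW (x, y, p) := pow_pos (by omega) _
      simp only [List.map_cons, List.sum_cons] at h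
      omega
  | succ f ih =>
    intro stack h seqs
    match stack with
    | [] => rfl
    | (x, y, p) :: rest =>
      rw [gsrLoopF]
      have hle : ((pushesB x y p ++ rest).map frameW).sum ≤ f := by
        simp only [List.map_append, List.sum_append]
        have := pushesB_measure_lt x y p p
        simp only [List.map_cons, List.sum_cons] at h
        omega
      rw [ih (pushesB x y p ++ rest) hle]
      rw [List.foldl_append, List.foldl_cons]
      congr 1
      -- one loop iteration computes exactly one unfolding of the fuel-free DFS
      rw [gsrSpec]
      unfold pushesB
      split_ifs <;>
        simp only [List.cons_append, List.nil_append, List.append_nil,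
          List.foldl_cons, List.foldl_nil]

-- ===== VERDICT (by name: the statement is the Claim_ definition above) =====
theorem generate_sequences_recursive_spec : Claim_equal_generate_sequences_recursive := by
  unfold Claim_equal_generate_sequences_recursive
  intro x_ y_ path sequences _ _
  unfold Spec_generate_sequences_recursive generate_sequences_recursive generate_sequences_recursive_alt
  rw [gsrGoF_eq_spec (x_.toNat + y_.toNat + 1) x_ y_ path (sequences.getD []) (by omega)]
  rw [gsrLoopF_eq_foldl (frameW (x_, y_, path)) [(x_, y_, path)]
    (by simp only [List.map_cons, List.map_nil, List.sum_cons, List.sum_nil]; omega)]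
  rfl
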